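-- pv_equiv track=rewrite | github.com/limits220284/CP | leetcode/1927.求和游戏.py | sumGame
-- ===== SOURCE A (Python) =====
-- def sumGame(num: str) -> bool:
--     # Bob只有一种赢的情况，就是两边的数字相同，并且？相同
--     # 否则先手必赢
--     n = len(num)
--     cnt1, ans1 = 0, 0
--     for i in range(n // 2):
--         if num[i] == '?':
--             cnt1 += 1
--         else:
--             ans1 += int(num[i])
--     l = [ans1 + cnt1 * 0, ans1 + cnt1 * 9]
--     cnt2, ans2 = 0, 0
--     for i in range(n // 2, n):
--         if num[i] == '?':
--             cnt2 += 1
--         else: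
--             ans2 += int(num[i])
--     r = [ans2 + cnt2 * 0, ans2 + cnt2 * 9]
--     for i in range(cnt2 + cnt1):
--         # Alice, 扩大优势，当优势无法扩大，便减少优势
--         if i % 2 == 0:
--             if l[0] < r[0]:
--                 if cnt2 > 0:
--                     r[0] += 9
--                     cnt2 -= 1
--                 else:
--                     cnt1 -= 1
--             elif l[0] > r[0]:
--                 if cnt1 > 0:
--                     l[0] += 9
--                     cnt1 -= 1
--                 else:
--                     cnt2 -= 1
--             else:
--                 if cnt1 > cnt2:
--                     l[0] += 9
--                     cnt1 -= 1
--                 elif cnt1 < cnt2: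
--                     r[0] += 9
--                     cnt2 -= 1
--                 else:
--                     return False
--         # Bob，减少优势
--         else:
--             if l[0] < r[0]:
--                 if cnt1 > 0:
--                     l[0] += 9
--                     cnt1 -= 1
--                 else:
--                     cnt2 -= 1
--             elif l[0] > r[0]:
--                 if cnt2 > 0:
--                     r[0] += 9
--                     cnt2 -= 1
--                 else:
--                     cnt1 -= 1
--             else:
--                 if cnt1 > cnt2:
--                     l[0] += 0
--                     cnt1 -= 1
--                 elif cnt1 < cnt2:
--                     r[0] += 0
--                     cnt2 -= 1
--                 else:
--                     return False
--     return l[0] != r[0]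
-- ===== SOURCE B (Python) =====
-- def sumGame(num: str) -> bool:
--     # Closed form: Alice wins iff the '?' count is odd, or the digit-sum
--     # imbalance cannot be exactly cancelled by splitting the '?'s (Bob can
--     # mirror only when sum_left - sum_right == 9*(q_right - q_left)//2).
--     h = len(num) // 2
--     s1 = q1 = s2 = q2 = 0
--     for c in num[:h]:
--         if c == '?':
--             q1 += 1
--         else:
--             s1 += int(c)
--     for c in num[h:]:
--         if c == '?':
--             q2 += 1
--         else:
--             s2 += int(c)
--     if (q1 + q2) % 2 == 1:
--         return True
--     return (s1 - s2) != 9 * (q2 - q1) // 2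
-- ===== Notes on version B (the rewrite author's own statement) =====
-- stated objective: simpler
-- what changed: Replaced the move-by-move game simulation loop (with [min,max] score pairs and turn logic) by a closed-form verdict: Alice wins iff the '?' count is odd or sum_left - sum_right != 9*(q_right - q_left)//2.
import Mathlib
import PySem

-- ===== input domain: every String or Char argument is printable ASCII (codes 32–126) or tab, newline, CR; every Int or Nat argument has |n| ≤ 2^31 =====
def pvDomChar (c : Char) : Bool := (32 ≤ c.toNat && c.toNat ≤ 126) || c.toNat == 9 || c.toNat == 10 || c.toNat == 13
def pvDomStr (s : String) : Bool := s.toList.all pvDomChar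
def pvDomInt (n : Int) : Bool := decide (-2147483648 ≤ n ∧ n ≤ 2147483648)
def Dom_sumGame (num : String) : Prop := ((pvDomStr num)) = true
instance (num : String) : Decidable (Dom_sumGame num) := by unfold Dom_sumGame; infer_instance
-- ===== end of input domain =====

-- B replaces A's move-by-move game-simulation loop by a closed-form verdict from the
-- two half scans (same result, simpler; no speed claim).

-- ===== PORT A =====
-- int(num[i]) for a single char; exact on Pre_ (digit chars)
def pyDigit (c : Char) : Int := (c.toNat : Int) - 48

-- the first/second-half scan loop of A: state (cnt, ans)
def scanA (cs : List Char) : Int × Int :=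
  cs.foldl (fun p c => if c = '?' then (p.1 + 1, p.2) else (p.1, p.2 + pyDigit c)) (0, 0)

-- the simulation loop 'for i in range(cnt2+cnt1)', state (i, l[0], r[0], cnt1, cnt2);
-- 'return False' mid-loop becomes the literal 'false', fuel = iteration count
def simA : Nat → Nat → Int → Int → Int → Int → Bool
  | 0, _, l0, r0, _, _ => l0 != r0
  | f + 1, i, l0, r0, c1, c2 =>
    if i % 2 == 0 then
      if l0 < r0 then
        if c2 > 0 then simA f (i + 1) l0 (r0 + 9) c1 (c2 - 1)
        else simA f (i + 1) l0 r0 (c1 - 1) c2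
      else if l0 > r0 then
        if c1 > 0 then simA f (i + 1) (l0 + 9) r0 (c1 - 1) c2
        else simA f (i + 1) l0 r0 c1 (c2 - 1)
      else
        if c1 > c2 then simA f (i + 1) (l0 + 9) r0 (c1 - 1) c2
        else if c1 < c2 then simA f (i + 1) l0 (r0 + 9) c1 (c2 - 1)
        else false
    else
      if l0 < r0 then
        if c1 > 0 then simA f (i + 1) (l0 + 9) r0 (c1 - 1) c2
        else simA f (i + 1) l0 r0 c1 (c2 - 1)
      else if l0 > r0 then
        if c2 > 0 then simA f (i + 1) l0 (r0 + 9) c1 (c2 - 1)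
        else simA f (i + 1) l0 r0 (c1 - 1) c2
      else
        if c1 > c2 then simA f (i + 1) (l0 + 0) r0 (c1 - 1) c2
        else if c1 < c2 then simA f (i + 1) l0 (r0 + 0) c1 (c2 - 1)
        else false

def sumGame (num : String) : Bool :=
  let cs := num.toList
  let n := cs.length
  let p1 := scanA (cs.take (n / 2))
  let p2 := scanA (cs.drop (n / 2))
  let l0 := p1.2 + p1.1 * 0
  let r0 := p2.2 + p2.1 * 0
  simA (p2.1 + p1.1).toNat 0 l0 r0 p1.1 p2.1

-- ===== PORT B =====
-- B's half scan: state (s, q)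
def scanB (cs : List Char) : Int × Int :=
  cs.foldl (fun p c => if c = '?' then (p.1, p.2 + 1) else (p.1 + pyDigit c, p.2)) (0, 0)

def sumGame_alt (num : String) : Bool :=
  let cs := num.toList
  let h := cs.length / 2
  let p1 := scanB (cs.take h)
  let p2 := scanB (cs.drop h)
  if (p1.2 + p2.2) % 2 == 1 then true
  else (p1.1 - p2.1) != PySem.Int.floordiv (9 * (p2.2 - p1.2)) 2

-- ===== PRECONDITION & SPEC =====
-- A raises ValueError (int(c)) on any character other than '?' or an ASCII digit
def Pre_sumGame (num : String) : Prop :=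
  (num.toList.all fun c => c == '?' || ('0' ≤ c && c ≤ '9')) = true
instance (num : String) : Decidable (Pre_sumGame num) := by unfold Pre_sumGame; infer_instance
def pvWitness_sumGame : String := "1?"

def Spec_sumGame (num : String) (out : Bool) : Prop := out = sumGame_alt num
instance (num : String) (out : Bool) : Decidable (Spec_sumGame num out) := by unfold Spec_sumGame; infer_instance

-- ===== CLAIM (what is proved, stated in full; the proofs are below) =====
def Claim_equal_sumGame : Prop := ∀ (num : String), Dom_sumGame num → Pre_sumGame num → Spec_sumGame num (sumGame num)

-- ===== LEMMAS AND PROOFS =====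

-- closed-form value of the simulation loop, by turn parity
def simVal : Nat → Nat → Int → Int → Int → Int → Bool
  | 0, f, l0, r0, c1, c2 => !decide (f % 2 = 0 ∧ 2 * (l0 - r0) = 9 * (c2 - c1))
  | _ + 1, f, l0, r0, c1, c2 =>
    !decide ((l0 = r0 ∧ c1 = c2) ∨
      (f % 2 = 1 ∧ ((l0 < r0 ∧ 2 * (l0 - r0) = 9 * (c2 - c1) - 9) ∨
                    (r0 < l0 ∧ 2 * (l0 - r0) = 9 * (c2 - c1) + 9) ∨
                    (l0 = r0 ∧ (c2 - c1 = 1 ∨ c2 - c1 = -1)))))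

theorem simA_eval : ∀ (f i : Nat) (l0 r0 c1 c2 : Int), 0 ≤ c1 → 0 ≤ c2 →
    c1 + c2 = (f : Int) → simA f i l0 r0 c1 c2 = simVal (i % 2) f l0 r0 c1 c2 := by
  intro f
  induction f with
  | zero =>
    intro i l0 r0 c1 c2 h1 h2 hf
    have hc1 : c1 = 0 := by omega
    have hc2 : c2 = 0 := by omega
    subst hc1; subst hc2
    rcases Nat.mod_two_eq_zero_or_one i with hi | hi <;>
      rw [hi] <;> simp only [simA, simVal, bne] <;> congr 1 <;>
      rw [show (l0 == r0) = decide (l0 = r0) from rfl, decide_eq_decide] <;>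
      first
        | omega
        | (simp only [true_and, and_true] <;> omega)
  | succ f ih =>
    intro i l0 r0 c1 c2 h1 h2 hf
    rcases Nat.mod_two_eq_zero_or_one i with hi | hi
    · have hpar1 : (i + 1) % 2 = 1 := by omega
      simp only [simA]
      rw [hi]
      rw [if_pos (show ((0:Nat) == 0) = true from rfl)]
      split_ifs with hA hB hC hD hE hF
      · rw [ih (i + 1) l0 (r0 + 9) c1 (c2 - 1) (by omega) (by omega) (by omega), hpar1]
        simp only [simVal]
        congr 1
        rw [decide_eq_decide]
        omega
      · rw [ih (i + 1) l0 r0 (c1 - 1) c2 (by omega) (by omega) (by omega), hpar1]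
        simp only [simVal]
        congr 1
        rw [decide_eq_decide]
        omega
      · rw [ih (i + 1) (l0 + 9) r0 (c1 - 1) c2 (by omega) (by omega) (by omega), hpar1]
        simp only [simVal]
        congr 1
        rw [decide_eq_decide]
        omega
      · rw [ih (i + 1) l0 r0 c1 (c2 - 1) (by omega) (by omega) (by omega), hpar1]
        simp only [simVal]
        congr 1
        rw [decide_eq_decide]
        omega
      · rw [ih (i + 1) (l0 + 9) r0 (c1 - 1) c2 (by omega) (by omega) (by omega), hpar1]
        simp only [simVal]
        congr 1
        rw [decide_eq_decide]
        omega
      · rw [ih (i + 1) l0 (r0 + 9) c1 (c2 - 1) (by omega) (by omega) (by omega), hpar1]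
        simp only [simVal]
        congr 1
        rw [decide_eq_decide]
        omega
      · simp only [simVal]
        rw [eq_comm, Bool.not_eq_false', decide_eq_true_eq]
        omega
    · have hpar0 : (i + 1) % 2 = 0 := by omega
      simp only [simA]
      rw [hi]
      rw [if_neg (show ¬ ((1:Nat) == 0) = true by decide)]
      split_ifs with hA hB hC hD hE hF
      · rw [ih (i + 1) (l0 + 9) r0 (c1 - 1) c2 (by omega) (by omega) (by omega), hpar0]
        simp only [simVal]
        congr 1
        rw [decide_eq_decide]
        omega
      · rw [ih (i + 1) l0 r0 c1 (c2 - 1) (by omega) (by omega) (by omega), hpar0]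
        simp only [simVal]
        congr 1
        rw [decide_eq_decide]
        omega
      · rw [ih (i + 1) l0 (r0 + 9) c1 (c2 - 1) (by omega) (by omega) (by omega), hpar0]
        simp only [simVal]
        congr 1
        rw [decide_eq_decide]
        omega
      · rw [ih (i + 1) l0 r0 (c1 - 1) c2 (by omega) (by omega) (by omega), hpar0]
        simp only [simVal]
        congr 1
        rw [decide_eq_decide]
        omega
      · rw [ih (i + 1) (l0 + 0) r0 (c1 - 1) c2 (by omega) (by omega) (by omega), hpar0]
        simp only [simVal]
        congr 1
        rw [decide_eq_decide]
        omega
      · rw [ih (i + 1) l0 (r0 + 0) c1 (c2 - 1) (by omega) (by omega) (by omega), hpar0]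
        simp only [simVal]
        congr 1
        rw [decide_eq_decide]
        omega
      · simp only [simVal]
        rw [eq_comm, Bool.not_eq_false', decide_eq_true_eq]
        omega

-- A's scan, generalized over the initial accumulator
theorem scan_swap (cs : List Char) : ∀ (q s : Int),
    cs.foldl (fun p c => if c = '?' then (p.1, p.2 + 1) else (p.1 + pyDigit c, p.2)) (s, q)
      = ((cs.foldl (fun p c => if c = '?' then (p.1 + 1, p.2) else (p.1, p.2 + pyDigit c)) (q, s)).2,
         (cs.foldl (fun p c => if c = '?' then (p.1 + 1, p.2) else (p.1, p.2 + pyDigit c)) (q, s)).1) := by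
  induction cs with
  | nil => intro q s; simp
  | cons c cs ih =>
    intro q s
    by_cases hc : c = '?'
    · simp only [List.foldl_cons, if_pos hc]
      exact ih (q + 1) s
    · simp only [List.foldl_cons, if_neg hc]
      exact ih q (s + pyDigit c)

theorem scan_cnt_nonneg (cs : List Char) : ∀ (q s : Int), 0 ≤ q →
    0 ≤ (cs.foldl (fun p c => if c = '?' then (p.1 + 1, p.2) else (p.1, p.2 + pyDigit c)) (q, s)).1 := by
  induction cs with
  | nil => intro q s h; simpa
  | cons c cs ih =>
    intro q s h
    by_cases hc : c = '?'
    · simp only [List.foldl_cons, if_pos hc]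
      exact ih (q + 1) s (by omega)
    · simp only [List.foldl_cons, if_neg hc]
      exact ih q (s + pyDigit c) h

-- ===== VERDICT (by name: the statement is the Claim_ definition above) =====
theorem sumGame_spec : Claim_equal_sumGame := by
  intro num _ _
  unfold Spec_sumGame sumGame sumGame_alt scanA scanB
  simp only [scan_swap]
  set cs := num.toList with hcs
  set pA1 := cs.take (cs.length / 2) |>.foldl
      (fun p c => if c = '?' then (p.1 + 1, p.2) else (p.1, p.2 + pyDigit c)) ((0:Int), (0:Int)) with hpA1
  set pA2 := cs.drop (cs.length / 2) |>.foldl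
      (fun p c => if c = '?' then (p.1 + 1, p.2) else (p.1, p.2 + pyDigit c)) ((0:Int), (0:Int)) with hpA2
  have h1 : 0 ≤ pA1.1 := by rw [hpA1]; exact scan_cnt_nonneg _ 0 0 le_rfl
  have h2 : 0 ≤ pA2.1 := by rw [hpA2]; exact scan_cnt_nonneg _ 0 0 le_rfl
  rw [simA_eval _ 0 _ _ _ _ h1 h2 (by omega)]
  simp only [simVal]
  by_cases hodd : ((pA1.1 + pA2.1) % 2 == 1) = true
  · rw [if_pos hodd]
    have hne : ¬ ((pA2.1 + pA1.1).toNat % 2 = 0) := by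
      simp only [beq_iff_eq] at hodd; omega
    simp [hne]
  · rw [if_neg hodd]
    have heven : (pA2.1 + pA1.1).toNat % 2 = 0 := by
      simp only [beq_iff_eq] at hodd; omega
    obtain ⟨m, hm⟩ : ∃ m, pA2.1 - pA1.1 = 2 * m := ⟨(pA2.1 - pA1.1) / 2, by omega⟩
    have hfd : PySem.Int.floordiv (9 * (pA2.1 - pA1.1)) 2 = 9 * m := by
      rw [hm, show (9 : Int) * (2 * m) = 2 * (9 * m) by ring]
      rw [PySem.Int.floordiv_eq_ediv_of_pos (by norm_num)]
      exact Int.mul_ediv_cancel_left _ (by norm_num)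
    rw [hfd]
    have hiff : ((pA2.1 + pA1.1).toNat % 2 = 0 ∧
        2 * (pA1.2 + pA1.1 * 0 - (pA2.2 + pA2.1 * 0)) = 9 * (pA2.1 - pA1.1))
        ↔ pA1.2 - pA2.2 = 9 * m := by
      constructor <;> intro h <;> [omega; exact ⟨heven, by omega⟩]
    rw [decide_eq_decide.mpr hiff]
    simp only [bne]
    rfl
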